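-- pv_equiv track=rewrite | github.com/caelanjmiller/Genomics-Lab-BIO5488 | assignment3/finding_gaps.py | count_dinucleotides
-- ===== SOURCE A (Python) =====
-- from collections import Counter
--
-- def count_dinucleotides(fasta: dict) -> dict:
--     """Counts dinucleotides & returns a dict of counts"""
--     dinucleotides: list = []
--     fasta_header: str = list(fasta.keys())[0]
--     # Convert sequence str from fasta dict into a list of individual characters
--     sequence: list = [*fasta[fasta_header]]
--     # Iterate through sequence & take slice of sequence list (2 nucleotides) and join together as a string and append to list
--     for nucleotide_index in range(len(sequence) - 1):
--         dinucleotide_slice: str = "".join(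
--             sequence[nucleotide_index : (nucleotide_index + 2)]
--         )
--         dinucleotides.append(dinucleotide_slice)
--     # Utilize Counter subclass to tally up the dinucleotides
--     dinucleotide_count: dict = dict(Counter(dinucleotides))
--     # Filter out non-canonical nucleotides from dinucleotide counts by iterating over list of dinucleotide keys ('AT', 'GC', etc) and removing them from dinucleotide count dictionary
--     non_canonical_nucleotides: list = [
--         "Y",
--         "N",
--         "W",
--         "R",
--         "B",
--         "H",
--         "V",
--         "S",
--         "K",
--         "D",
--         "M",
--         "U",
--     ]
--     for dinucleotide in list(dinucleotide_count.keys()):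
--         if any(nucleotide in dinucleotide for nucleotide in non_canonical_nucleotides):
--             del dinucleotide_count[dinucleotide]
--     return dict(sorted(dinucleotide_count.items()))
-- ===== SOURCE B (Python) =====
-- def count_dinucleotides(fasta: dict) -> dict:
--     """Counts dinucleotides & returns a dict of counts"""
--     non_canonical = {"Y", "N", "W", "R", "B", "H", "V", "S", "K", "D", "M", "U"}
--     sequence = list(fasta.values())[0]
--     counts: dict = {}
--     for first, second in zip(sequence, sequence[1:]):
--         if first not in non_canonical and second not in non_canonical:
--             pair = first + second
--             counts[pair] = counts.get(pair, 0) + 1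
--     return dict(sorted(counts.items()))
-- ===== Notes on version B (the rewrite author's own statement) =====
-- stated objective: simpler
-- what changed: B replaces A's three-phase shape (build a list of all dinucleotide strings, Counter it, then delete non-canonical keys from the dict) with one pass over zip(seq, seq[1:]) that increments a count only when neither character is non-canonical, so the intermediate dinucleotide list and the key-deletion loop disappear.
-- outside the precondition, e.g. on count_dinucleotides({}): A raises IndexError, B raises IndexError
import Mathlib
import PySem

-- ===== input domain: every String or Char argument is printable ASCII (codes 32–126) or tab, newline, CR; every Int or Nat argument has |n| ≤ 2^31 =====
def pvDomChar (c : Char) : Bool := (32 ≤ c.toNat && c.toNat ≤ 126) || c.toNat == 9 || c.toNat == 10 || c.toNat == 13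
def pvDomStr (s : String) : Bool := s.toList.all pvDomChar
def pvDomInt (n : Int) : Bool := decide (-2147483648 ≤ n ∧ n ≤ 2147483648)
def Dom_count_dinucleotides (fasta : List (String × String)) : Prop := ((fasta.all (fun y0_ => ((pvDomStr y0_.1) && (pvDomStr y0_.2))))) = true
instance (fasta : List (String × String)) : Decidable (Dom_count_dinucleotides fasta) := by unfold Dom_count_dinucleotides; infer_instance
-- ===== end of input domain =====

-- B merges A's count-everything-then-delete-non-canonical two-phase computation into a single
-- filtered counting pass over adjacent character pairs; same result, proved below.

-- ===== PORT A =====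
-- the twelve non-canonical nucleotide letters (each a one-character Python string, held as a Char)
def pvNonCanonA : List Char := ['Y', 'N', 'W', 'R', 'B', 'H', 'V', 'S', 'K', 'D', 'M', 'U']

def count_dinucleotides (fasta : List (String × String)) : List (String × Int) :=
  let d := PySem.Dict.ofList fasta
  -- fasta_header = list(fasta.keys())[0]  (IndexError on an empty dict: excluded by Pre_)
  match PySem.List.pyGet? d.keys 0 with
  | none => []
  | some fastaHeader =>
    -- sequence = [*fasta[fasta_header]]  (the header is a key of d, so the "" default is never used)
    let sequence := (d.getD fastaHeader "").toList
    -- for nucleotide_index in range(len(sequence) - 1): dinucleotides.append("".join(sequence[i:i+2]))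
    let dinucleotides := (PySem.List.pyRange 0 ((sequence.length : Int) - 1)).foldl
      (fun acc i => acc ++ [String.ofList (PySem.List.slice sequence (some i) (some (i + 2)))]) []
    -- dinucleotide_count = dict(Counter(dinucleotides))
    let dinucleotideCount := PySem.Dict.counter dinucleotides
    -- for dinucleotide in list(dinucleotide_count.keys()): if any(n in dinucleotide for n in ...): del ...
    -- ('n in dinucleotide' with a one-character n is membership of that character among the chars: exact)
    let filtered := dinucleotideCount.keys.foldl
      (fun dd din =>
        if pvNonCanonA.any (fun n => din.toList.contains n) then dd.erase din else dd)
      dinucleotideCount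
    -- return dict(sorted(dinucleotide_count.items()))  (tuple comparison on the (key, value) pairs)
    PySem.List.sorted2 filtered.items (fun p => p.1) (fun p => p.2)

-- ===== PORT B =====
-- Source B's non_canonical set of twelve one-character strings, held as a set of Chars
def pvNonCanonB : PySem.Set Char :=
  PySem.Set.ofList ['Y', 'N', 'W', 'R', 'B', 'H', 'V', 'S', 'K', 'D', 'M', 'U']

def count_dinucleotides_alt (fasta : List (String × String)) : List (String × Int) :=
  let d := PySem.Dict.ofList fasta
  -- sequence = list(fasta.values())[0]  (IndexError on an empty dict: excluded by Pre_)
  match PySem.List.pyGet? d.values 0 with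
  | none => []
  | some s =>
    let cs := s.toList
    -- for first, second in zip(sequence, sequence[1:]):
    --   if first not in non_canonical and second not in non_canonical:
    --     counts[pair] = counts.get(pair, 0) + 1
    let counts := (cs.zip (PySem.List.slice cs (some 1) none)).foldl
      (fun acc p =>
        if !(PySem.Set.contains pvNonCanonB p.1) && !(PySem.Set.contains pvNonCanonB p.2) then
          acc.insert (String.ofList [p.1, p.2]) (acc.getD (String.ofList [p.1, p.2]) 0 + 1)
        else acc)
      PySem.Dict.empty
    -- return dict(sorted(counts.items()))
    PySem.List.sorted2 counts.items (fun p => p.1) (fun p => p.2)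

-- ===== PRECONDITION & SPEC =====
-- Pre_ excludes only the empty dict, on which A raises IndexError (list(fasta.keys())[0]).
def Pre_count_dinucleotides (fasta : List (String × String)) : Prop := fasta ≠ []
instance (fasta : List (String × String)) : Decidable (Pre_count_dinucleotides fasta) := by
  unfold Pre_count_dinucleotides; infer_instance

def pvWitness_count_dinucleotides : (List (String × String)) := [("seq1", "ACGTNAC")]

def Spec_count_dinucleotides (fasta : List (String × String)) (out : List (String × Int)) : Prop :=
  out = count_dinucleotides_alt fasta
instance (fasta : List (String × String)) (out : List (String × Int)) :
    Decidable (Spec_count_dinucleotides fasta out) := by unfold Spec_count_dinucleotides; infer_instance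

-- ===== CLAIM (what is proved, stated in full; the proofs are below) =====
def Claim_equal_count_dinucleotides : Prop := ∀ (fasta : List (String × String)),
  Dom_count_dinucleotides fasta → Pre_count_dinucleotides fasta →
  Spec_count_dinucleotides fasta (count_dinucleotides fasta)

-- ===== LEMMAS AND PROOFS =====

-- A's key-containing-a-non-canonical-letter test, and B's per-pair filter and pair-to-string map
def pvBad (s : String) : Bool := pvNonCanonA.any (fun n => s.toList.contains n)
def pvGood (pr : Char × Char) : Bool :=
  !(PySem.Set.contains pvNonCanonB pr.1) && !(PySem.Set.contains pvNonCanonB pr.2)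
def pvG (pr : Char × Char) : String := String.ofList [pr.1, pr.2]

-- keys of a dict built from an association list are the distinct first components, in order
lemma pv_keys_ofList (ps : List (String × String)) :
    (PySem.Dict.ofList ps).keys = PySem.Set.ofList (ps.map (fun p => p.1)) := by
  have h : PySem.Dict.ofList ps = ps.foldl (fun d p => d.insert p.1 p.2) PySem.Dict.empty := by
    simp [PySem.Dict.ofList, PySem.Dict.update, PySem.Dict.empty]
  rw [h, PySem.Dict.keys_foldl_insert_key ps (fun p => p.1) (fun _ p => p.2)]
  simp [PySem.Dict.keys_empty, PySem.Set.update_nil_left]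

-- A's delete loop on the items level: erasing every key satisfying p filters the items
lemma pv_erase_fold (p : String → Bool) (l : List String) (d : PySem.Dict String Int) :
    (l.foldl (fun dd k => if p k then dd.erase k else dd) d).items
      = d.items.filter (fun q => !(p q.1 && l.contains q.1)) := by
  induction l generalizing d with
  | nil => simp
  | cons x t ih =>
    simp only [List.foldl_cons]
    rw [ih]
    by_cases hx : p x = true
    · rw [if_pos hx]
      have he : (d.erase x).items = d.items.filter (fun q => !(q.1 == x)) := by
        simp [PySem.Dict.erase]
      rw [he, List.filter_filter]
      apply List.filter_congr
      intro q _
      by_cases hqx : q.1 = x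
      · simp [hqx, hx]
      · simp [hqx]
    · rw [if_neg hx]
      apply List.filter_congr
      intro q _
      by_cases hqx : q.1 = x
      · have hx' : p x = false := by simpa using hx
        simp [hqx, hx']
      · simp [hqx]

-- building the set of a filtered list filters the set
lemma pv_ofList_filter (q : String → Bool) (xs : List String) :
    PySem.Set.ofList (xs.filter q) = (PySem.Set.ofList xs).filter q := by
  have aux : ∀ (ys : List String) (s : List String),
      (ys.filter q).foldl PySem.Set.add (s.filter q) = (ys.foldl PySem.Set.add s).filter q := by
    intro ys
    induction ys with
    | nil => intro s; rfl
    | cons x t ih =>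
      intro s
      cases hq : q x
      · have h1 : (x :: t).filter q = t.filter q := by simp [hq]
        have h2 : (PySem.Set.add s x).filter q = s.filter q := by
          simp only [PySem.Set.add]
          split
          · rfl
          · simp [List.filter_append, hq]
        rw [h1, List.foldl_cons, ← ih (PySem.Set.add s x), h2]
      · have h1 : (x :: t).filter q = x :: t.filter q := by simp [hq]
        have h2 : PySem.Set.add (s.filter q) x = (PySem.Set.add s x).filter q := by
          have hc : PySem.Set.contains (s.filter q) x = PySem.Set.contains s x := by
            simp [PySem.Set.contains, List.mem_filter, hq]
          simp only [PySem.Set.add, hc]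
          split
          · rfl
          · simp [List.filter_append, hq]
        rw [h1, List.foldl_cons, List.foldl_cons, h2, ih]
  have h0 : PySem.Set.ofList (xs.filter q) = (xs.filter q).foldl PySem.Set.add [] := by
    rw [PySem.Set.ofList_eq_foldl]
  rw [h0]
  have hnil : ([] : List String) = ([] : List String).filter q := rfl
  rw [hnil, aux, ← PySem.Set.ofList_eq_foldl]

-- Counter-then-delete equals Counter of the filtered list, on the items level
lemma pv_counter_filter (p : String → Bool) (xs : List String) :
    ((PySem.Dict.counter xs).keys.foldl
        (fun dd k => if p k then dd.erase k else dd) (PySem.Dict.counter xs)).items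
      = (PySem.Dict.counter (xs.filter (fun x => !p x))).items := by
  rw [pv_erase_fold, PySem.Dict.keys_counter, PySem.Dict.items_counter, PySem.Dict.items_counter]
  rw [List.filter_map, pv_ofList_filter]
  have hfc : List.filter ((fun q : String × Int => !(p q.1 && List.contains (PySem.Set.ofList xs) q.1))
        ∘ (fun k => (k, (List.count k xs : Int)))) (PySem.Set.ofList xs)
      = List.filter (fun x => !p x) (PySem.Set.ofList xs) := by
    apply List.filter_congr
    intro k hk
    simp [Function.comp, hk]
  rw [hfc]
  apply List.map_congr_left
  intro k hk
  have hq : (!p k) = true := (List.mem_filter.mp hk).2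
  have hcnt : List.count k (xs.filter (fun x => !p x)) = List.count k xs :=
    List.count_filter (p := fun x => !p x) hq
  refine Prod.ext rfl ?_
  show ((List.count k xs : Nat) : Int) = ((List.count k (xs.filter (fun x => !p x)) : Nat) : Int)
  exact_mod_cast hcnt.symm

-- any of twelve letters occurring among two characters = either character being one of them
lemma pv_any_pair (l : List Char) (a b : Char) :
    (l.any fun n => [a, b].contains n) = (l.contains a || l.contains b) := by
  induction l with
  | nil => rfl
  | cons x t ih =>
    by_cases hxa : x = a
    · subst hxa; simp [List.any_cons]
    · by_cases hxb : x = b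
      · subst hxb; simp [List.any_cons]
      · simp only [List.any_cons]
        rw [ih]
        simp [hxa, hxb, Ne.symm hxa, Ne.symm hxb]

-- A's per-key deletion test agrees with B's per-pair filter
lemma pv_good_eq (pr : Char × Char) : (!pvBad (pvG pr)) = pvGood pr := by
  obtain ⟨a, b⟩ := pr
  have ht : (String.ofList [a, b]).toList = [a, b] := by simp
  have hB : (pvNonCanonB : List Char) = pvNonCanonA := by decide
  simp only [pvBad, pvGood, pvG, ht, pv_any_pair, PySem.Set.contains, hB]
  simp [Bool.not_or]

-- A's dinucleotide list is the adjacent-pairs list rendered as strings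
lemma pv_dinucs (cs : List Char) :
    (PySem.List.pyRange 0 ((cs.length : Int) - 1)).foldl
        (fun acc i => acc ++ [String.ofList (PySem.List.slice cs (some i) (some (i + 2)))]) []
      = (cs.zip cs.tail).map pvG := by
  rw [PySem.List.foldl_append_singleton_eq_map]
  cases cs with
  | nil => rfl
  | cons a t =>
    have hlen : (((a :: t).length : Int)) - 1 = ((t.length : Nat) : Int) := by
      simp [List.length_cons]
    rw [hlen, PySem.List.pyRange_zero_natCast, List.map_map]
    apply List.ext_getElem
    · simp
    · intro i h1 h2
      simp only [List.nil_append, List.length_map, List.length_range] at h1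
      simp only [List.getElem_map, List.getElem_range, Function.comp_apply, List.getElem_zip,
        List.nil_append]
      have h2' : ((i : Int) + 2) = ((i : Int) + ((2 : Nat) : Int)) := by norm_num
      rw [h2', PySem.List.slice_natCast_add]
      have hi : i < (a :: t).length := by simp; omega
      have hit : i < t.length := h1
      have htake : List.take 2 (List.drop i (a :: t)) = [(a :: t)[i], t[i]] := by
        rw [List.drop_eq_getElem_cons hi]
        simp only [List.drop_succ_cons]
        rw [List.drop_eq_getElem_cons hit]
        rfl
      rw [htake]
      simp [pvG]

-- B's counting loop is the Counter of the good pairs rendered as strings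
lemma pv_bfold (cs : List Char) :
    (cs.zip (PySem.List.slice cs (some 1) none)).foldl
        (fun acc p =>
          if !(PySem.Set.contains pvNonCanonB p.1) && !(PySem.Set.contains pvNonCanonB p.2) then
            acc.insert (String.ofList [p.1, p.2]) (acc.getD (String.ofList [p.1, p.2]) 0 + 1)
          else acc)
        PySem.Dict.empty
      = PySem.Dict.counter (((cs.zip cs.tail).filter pvGood).map pvG) := by
  rw [PySem.List.slice_from_one]
  have h := PySem.List.foldl_if_eq_foldl_filter
      (p := fun pr : Char × Char =>
        !(PySem.Set.contains pvNonCanonB pr.1) && !(PySem.Set.contains pvNonCanonB pr.2))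
      (f := fun (acc : PySem.Dict String Int) pr =>
        acc.insert (String.ofList [pr.1, pr.2]) (acc.getD (String.ofList [pr.1, pr.2]) 0 + 1))
      (l := cs.zip cs.tail) (init := PySem.Dict.empty)
  beta_reduce at h
  rw [h, ← PySem.Dict.foldl_insert_getD_add_one_eq_counter, List.foldl_map]
  rfl

-- filtering the rendered strings = rendering the filtered pairs
lemma pv_maps (cs : List Char) :
    ((cs.zip cs.tail).map pvG).filter (fun s => !pvBad s)
      = ((cs.zip cs.tail).filter pvGood).map pvG := by
  rw [List.filter_map]
  congr 1
  exact List.filter_congr (fun pr _ => pv_good_eq pr)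


-- ===== VERDICT (by name: the statement is the Claim_ definition above) =====
theorem count_dinucleotides_spec : Claim_equal_count_dinucleotides := by
  intro fasta _ hpre
  unfold Spec_count_dinucleotides
  obtain ⟨k, kt, hk⟩ : ∃ k kt, (PySem.Dict.ofList fasta).keys = k :: kt := by
    cases hK : (PySem.Dict.ofList fasta).keys with
    | cons k kt => exact ⟨k, kt, rfl⟩
    | nil =>
      exfalso
      cases fasta with
      | nil => exact hpre rfl
      | cons a t =>
        have hmem : a.1 ∈ PySem.Set.ofList (((a :: t)).map (fun p => p.1)) :=
          (PySem.Set.mem_ofList _ _).mpr (by simp)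
        rw [← pv_keys_ofList, hK] at hmem
        simp at hmem
  have hvals : (PySem.Dict.ofList fasta).values
      = ((PySem.Dict.ofList fasta).getD k "")
        :: kt.map (fun k' => (PySem.Dict.ofList fasta).getD k' "") := by
    rw [PySem.Dict.values_eq_map_keys _ (PySem.Dict.nodup_keys_ofList fasta) "", hk]
    simp
  have hg1 : PySem.List.pyGet? ((PySem.Dict.ofList fasta).keys) 0 = some k := by
    rw [hk]; simp [PySem.List.pyGet?, PySem.List.pyIdx?]
  have hg2 : PySem.List.pyGet? ((PySem.Dict.ofList fasta).values) 0
      = some ((PySem.Dict.ofList fasta).getD k "") := by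
    rw [hvals]; simp [PySem.List.pyGet?, PySem.List.pyIdx?]
  simp only [count_dinucleotides, count_dinucleotides_alt, hg1, hg2]
  rw [pv_bfold, pv_dinucs]
  congr 1
  rw [pv_counter_filter (fun din => pvNonCanonA.any fun n => din.toList.contains n)]
  have hpb : (fun x : String => !(pvNonCanonA.any fun n => x.toList.contains n))
      = (fun s => !pvBad s) := rfl
  rw [hpb, pv_maps]
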